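-- pv_equiv track=rewrite | github.com/DrNogNog/Probability-and-Combinatoric-Structures | ps6.py | are_parts_nonoverlapping
-- ===== SOURCE A (Python) =====
-- def are_parts_nonoverlapping(p):
--     for i in range(0, len(p)):
--       s = p[i]
--       for elem in s:
--           for others in range(0,i):
--               if elem in p[others] :
--                   return False
--           for otherss in range(i+1,len(p)):
--               if elem in p[otherss] :
--                   return False
--
--     return True
-- ===== SOURCE B (Python) =====
-- def are_parts_nonoverlapping(p):
--     all_elems = set()
--     total = 0
--     for part in p:
--         s = set(part)
--         total += len(s)
--         all_elems |= s
--     return len(all_elems) == total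
-- ===== Notes on version B (the rewrite author's own statement) =====
-- stated objective: alternative
-- what changed: Replaces A's nested index loops (each element scanned against every other part) with a single pass accumulating a union set and a sum of deduped part sizes, returning whether the union's cardinality equals the sum.
import Mathlib
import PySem

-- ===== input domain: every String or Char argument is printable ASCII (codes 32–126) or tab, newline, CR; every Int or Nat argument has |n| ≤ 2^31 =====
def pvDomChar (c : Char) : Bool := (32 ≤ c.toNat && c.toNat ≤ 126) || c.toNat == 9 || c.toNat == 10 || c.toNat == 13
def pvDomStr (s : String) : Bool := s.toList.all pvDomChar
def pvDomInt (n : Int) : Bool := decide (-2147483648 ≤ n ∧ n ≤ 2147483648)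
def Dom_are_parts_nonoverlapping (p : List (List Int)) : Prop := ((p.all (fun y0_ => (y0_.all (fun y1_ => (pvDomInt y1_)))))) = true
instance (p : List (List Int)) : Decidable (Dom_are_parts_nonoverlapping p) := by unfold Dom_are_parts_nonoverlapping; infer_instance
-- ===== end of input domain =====

-- B replaces A's nested pairwise membership scans by one pass that unions the deduped parts
-- and compares the union's cardinality with the sum of the deduped part sizes (objective: alternative single-pass formulation).

-- ===== PORT A =====
-- inner body for one element `elem` of part p[i]: both "return False" scans, in A's order
def apElemOk (p : List (List Int)) (i : Int) (elem : Int) : Bool :=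
  if (PySem.List.pyRange 0 i 1).any (fun o => (PySem.List.pyGetD p o []).contains elem) then false
  else if (PySem.List.pyRange (i + 1) (p.length : Int) 1).any
            (fun o => (PySem.List.pyGetD p o []).contains elem) then false
  else true

def are_parts_nonoverlapping (p : List (List Int)) : Bool :=
  (PySem.List.pyRange 0 (p.length : Int) 1).all
    (fun i => (PySem.List.pyGetD p i []).all (fun elem => apElemOk p i elem))

-- ===== PORT B =====
def bStep (acc : PySem.Set Int × Int) (part : List Int) : PySem.Set Int × Int :=
  let s := PySem.Set.ofList part
  (PySem.Set.union acc.1 s, acc.2 + PySem.Set.len s)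

def are_parts_nonoverlapping_alt (p : List (List Int)) : Bool :=
  let r := p.foldl bStep (PySem.Set.empty, 0)
  PySem.Set.len r.1 == r.2

-- ===== PRECONDITION & SPEC =====
def Spec_are_parts_nonoverlapping (p : List (List Int)) (out : Bool) : Prop := out = are_parts_nonoverlapping_alt p
instance (p : List (List Int)) (out : Bool) : Decidable (Spec_are_parts_nonoverlapping p out) := by unfold Spec_are_parts_nonoverlapping; infer_instance

-- ===== CLAIM (what is proved, stated in full; the proofs are below) =====
def Claim_equal_are_parts_nonoverlapping : Prop := ∀ (p : List (List Int)), Dom_are_parts_nonoverlapping p → Spec_are_parts_nonoverlapping p (are_parts_nonoverlapping p)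

-- ===== LEMMAS AND PROOFS =====

-- the common specification: the parts are pairwise disjoint
def PartsDisj (a b : List Int) : Prop := ∀ x ∈ a, x ∉ b

theorem partsDisj_nil (a : List Int) : PartsDisj a [] := by
  intro x _ hx; exact (List.not_mem_nil) hx

-- ---- A-side: A p = true ↔ pairwise disjoint ----

-- index bridge: p[i] for an in-range Int/Nat index
theorem pyGetD_nat (p : List (List Int)) (k : Nat) (hk : k < p.length) :
    PySem.List.pyGetD p (k : Int) [] = p[k] := by
  rw [PySem.List.pyGetD_natCast]; exact List.getD_eq_getElem p [] hk

theorem pyGetD_int (p : List (List Int)) (i : Int) (h0 : 0 ≤ i)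
    (hn : i.toNat < p.length) :
    PySem.List.pyGetD p i [] = p[i.toNat] := by
  conv_lhs => rw [← Int.toNat_of_nonneg h0]
  rw [PySem.List.pyGetD_natCast]
  exact List.getD_eq_getElem p [] hn


theorem apA_iff (p : List (List Int)) :
    are_parts_nonoverlapping p = true ↔ List.Pairwise PartsDisj p := by
  rw [List.pairwise_iff_getElem]
  unfold are_parts_nonoverlapping apElemOk
  simp only [List.all_eq_true, PySem.List.mem_pyRange_one, List.any_eq_true,
    Bool.if_false_left, Bool.and_eq_true, Bool.not_eq_true',
    List.contains_eq_mem, decide_eq_false_iff_not, not_exists, not_and,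
    decide_eq_true_eq, and_true]
  constructor
  · intro h i j hi hj hij x hx
    have h0i : (0:Int) ≤ (i:Int) := by positivity
    have hin : ((i:Int)) < (p.length : Int) := by exact_mod_cast hi
    rcases h (i:Int) ⟨h0i, hin⟩ x (by rwa [pyGetD_nat p i hi]) with ⟨-, h2⟩
    have := h2 (j : Int) ⟨by exact_mod_cast hij, by exact_mod_cast hj⟩
    rwa [pyGetD_nat p j hj] at this
  · intro h i hi x hx
    obtain ⟨h0i, hin⟩ := hi
    rw [pyGetD_int p i h0i (by omega)] at hx
    have hiN : i.toNat < p.length := by omega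
    constructor
    · intro o ho
      obtain ⟨h0o, hoi⟩ := ho
      rw [pyGetD_int p o h0o (by omega)]
      intro hmem
      exact h o.toNat i.toNat (by omega) hiN (by omega) x hmem hx
    · intro o ho
      obtain ⟨hio, hon⟩ := ho
      rw [pyGetD_int p o (by omega) (by omega)]
      exact h i.toNat o.toNat hiN (by omega) (by omega) x hx

-- ---- B-side: the fold invariant ----

-- after folding p from a duplicate-free set s and running total t:
-- the set stays duplicate-free, |set| - total can only shrink below |s| - t,
-- and it stays equal iff p is pairwise disjoint and every part avoids s
theorem bFold_inv (p : List (List Int)) :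
    ∀ (s : List Int) (t : Int), s.Nodup →
      (p.foldl bStep (s, t)).1.Nodup ∧
      (((p.foldl bStep (s, t)).1.length : Int) - (p.foldl bStep (s, t)).2
          ≤ (s.length : Int) - t) ∧
      ((((p.foldl bStep (s, t)).1.length : Int) - (p.foldl bStep (s, t)).2
          = (s.length : Int) - t)
        ↔ (List.Pairwise PartsDisj p ∧ ∀ q ∈ p, PartsDisj q s)) := by
  induction p with
  | nil =>
    intro s t hs
    refine ⟨hs, le_refl _, ?_⟩
    simp [List.Pairwise.nil]
  | cons part rest ih =>
    intro s t hs
    have hsu : (PySem.Set.union s (PySem.Set.ofList part)).Nodup :=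
      PySem.Set.nodup_union _ _ hs
    have hfold :
        (part :: rest).foldl bStep (s, t)
          = rest.foldl bStep (PySem.Set.union s (PySem.Set.ofList part),
              t + PySem.Set.len (PySem.Set.ofList part)) := by
      simp [bStep]
    obtain ⟨hnd, hle, hiff⟩ :=
      ih (PySem.Set.union s (PySem.Set.ofList part))
         (t + PySem.Set.len (PySem.Set.ofList part)) hsu
    -- cardinality of the union
    have hlenU :
        ((PySem.Set.union s (PySem.Set.ofList part)).length : Int)
          = (s.length : Int)
            + ((PySem.Set.ofList part).filter (fun y => !PySem.Set.contains s y)).length := by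
      rw [PySem.Set.union_eq_update, PySem.Set.update_eq_append_filter,
        List.length_append]
      push_cast
      rw [PySem.Set.ofList_ofList]
    have hfle : ((PySem.Set.ofList part).filter (fun y => !PySem.Set.contains s y)).length
        ≤ (PySem.Set.ofList part).length := List.length_filter_le _ _
    have hlen : PySem.Set.len (PySem.Set.ofList part)
        = ((PySem.Set.ofList part).length : Int) := by
      simp [PySem.Set.len]
    -- the slack lost at this step
    have hstep :
        ((PySem.Set.union s (PySem.Set.ofList part)).length : Int)
            - (t + PySem.Set.len (PySem.Set.ofList part))
          ≤ (s.length : Int) - t := by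
      rw [hlenU, hlen]; omega
    -- equality at this step ↔ the new part avoids s
    have hstepEq :
        (((PySem.Set.union s (PySem.Set.ofList part)).length : Int)
            - (t + PySem.Set.len (PySem.Set.ofList part))
          = (s.length : Int) - t)
        ↔ PartsDisj part s := by
      rw [hlenU, hlen]
      constructor
      · intro heq x hx hxs
        have hflen : ((PySem.Set.ofList part).filter (fun y => !PySem.Set.contains s y)).length
            = (PySem.Set.ofList part).length := by push_cast at heq; omega
        have hfeq : (PySem.Set.ofList part).filter (fun y => !PySem.Set.contains s y)
            = PySem.Set.ofList part :=
          ((PySem.Set.ofList part).filter_sublist (p := fun y => !PySem.Set.contains s y)).eq_of_length hflen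
        have hxofl : x ∈ PySem.Set.ofList part := (PySem.Set.mem_ofList part x).mpr hx
        have := List.of_mem_filter (p := fun y => !PySem.Set.contains s y) (by rw [hfeq]; exact hxofl)
        simp only [Bool.not_eq_true', PySem.Set.contains_eq_decide, decide_eq_false_iff_not] at this
        exact this hxs
      · intro hdisj
        have : (PySem.Set.ofList part).filter (fun y => !PySem.Set.contains s y)
            = PySem.Set.ofList part := by
          rw [List.filter_eq_self]
          intro a ha
          simp only [Bool.not_eq_true', PySem.Set.contains_eq_decide, decide_eq_false_iff_not]
          exact hdisj a ((PySem.Set.mem_ofList part a).mp ha)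
        rw [this]; omega
    refine ⟨by rw [hfold]; exact hnd, ?_, ?_⟩
    · rw [hfold]; exact le_trans hle hstep
    · rw [hfold]
      constructor
      · intro heq
        have h1 := le_antisymm hle (by omega)
        have h2 : ((PySem.Set.union s (PySem.Set.ofList part)).length : Int)
            - (t + PySem.Set.len (PySem.Set.ofList part)) = (s.length : Int) - t := by
          omega
        obtain ⟨hpw, hall⟩ := hiff.mp h1
        have hds : PartsDisj part s := hstepEq.mp h2
        refine ⟨List.Pairwise.cons ?_ hpw, ?_⟩
        · intro q hq x hx hxq
          exact (hall q hq) x hxq ((PySem.Set.mem_union s _ x).mpr (Or.inr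
            ((PySem.Set.mem_ofList part x).mpr hx)))
        · intro q hq
          rcases List.mem_cons.mp hq with rfl | hq'
          · exact hds
          · intro x hx hxs
            exact (hall q hq') x hx ((PySem.Set.mem_union s _ x).mpr (Or.inl hxs))
      · rintro ⟨hpw, hall⟩
        rcases List.pairwise_cons.mp hpw with ⟨hpart, hrest⟩
        have hds : PartsDisj part s := hall part List.mem_cons_self
        have h2 := hstepEq.mpr hds
        have h1 : ((rest.foldl bStep (PySem.Set.union s (PySem.Set.ofList part),
              t + PySem.Set.len (PySem.Set.ofList part))).1.length : Int)
            - (rest.foldl bStep (PySem.Set.union s (PySem.Set.ofList part),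
              t + PySem.Set.len (PySem.Set.ofList part))).2
            = ((PySem.Set.union s (PySem.Set.ofList part)).length : Int)
              - (t + PySem.Set.len (PySem.Set.ofList part)) := by
          apply hiff.mpr
          refine ⟨hrest, ?_⟩
          intro q hq x hx hxu
          rcases (PySem.Set.mem_union s _ x).mp hxu with hxs | hxp
          · exact hall q (List.mem_cons_of_mem _ hq) x hx hxs
          · exact hpart q hq x ((PySem.Set.mem_ofList part x).mp hxp) hx
        omega

theorem apB_iff (p : List (List Int)) :
    are_parts_nonoverlapping_alt p = true ↔ List.Pairwise PartsDisj p := by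
  obtain ⟨-, hle, hiff⟩ := bFold_inv p (PySem.Set.empty) 0 (by simp [PySem.Set.empty])
  unfold are_parts_nonoverlapping_alt
  simp only [PySem.Set.empty, List.length_nil, Nat.cast_zero, sub_zero] at hle hiff ⊢
  have hempty : (∀ q ∈ p, PartsDisj q ([] : List Int)) := fun q _ => partsDisj_nil q
  rw [beq_iff_eq, PySem.Set.len]
  constructor
  · intro h
    exact (hiff.mp (by omega)).1
  · intro h
    have := hiff.mpr ⟨h, hempty⟩
    omega

-- ===== VERDICT (by name: the statement is the Claim_ definition above) =====
theorem are_parts_nonoverlapping_spec : Claim_equal_are_parts_nonoverlapping := by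
  intro p _
  unfold Spec_are_parts_nonoverlapping
  have hA := apA_iff p
  have hB := apB_iff p
  cases hA' : are_parts_nonoverlapping p <;> cases hB' : are_parts_nonoverlapping_alt p <;>
    simp_all
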